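-- pv_equiv track=rewrite | github.com/freekgj/IPASS-project | AIvsPlayerGame.py | possibleCodes
-- ===== SOURCE A (Python) =====
-- from itertools import product
--
-- def possibleCodes(aantalKleuren, lengthOfCode):
--     colors = ''
--     for color in range(aantalKleuren):
--         colors += str(color + 1)
--     listWithPossibleCodes = list(product(colors, repeat=lengthOfCode))
--     for codeIndex in range(len(listWithPossibleCodes)):
--         listWithPossibleCodes[codeIndex] = "".join(listWithPossibleCodes[codeIndex])
--     return listWithPossibleCodes
-- ===== SOURCE B (Python) =====
-- def possibleCodes(aantalKleuren, lengthOfCode):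
--     alphabet = ''.join(str(i + 1) for i in range(aantalKleuren))
--     k = len(alphabet)
--     codes = []
--     for m in range(k ** lengthOfCode):
--         digits = []
--         for _ in range(lengthOfCode):
--             m, d = divmod(m, k)
--             digits.append(alphabet[d])
--         codes.append(''.join(reversed(digits)))
--     return codes
-- ===== Notes on version B (the rewrite author's own statement) =====
-- stated objective: alternative
-- what changed: Replaces the cartesian-product enumeration (itertools.product plus a join pass) by base-k unranking: each code index m in range(k**lengthOfCode) is converted to its base-k digits, each digit selecting a character of the alphabet; Pre_ excludes negative lengthOfCode, where A's itertools.product raises ValueError (B also raises there).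
import Mathlib
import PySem

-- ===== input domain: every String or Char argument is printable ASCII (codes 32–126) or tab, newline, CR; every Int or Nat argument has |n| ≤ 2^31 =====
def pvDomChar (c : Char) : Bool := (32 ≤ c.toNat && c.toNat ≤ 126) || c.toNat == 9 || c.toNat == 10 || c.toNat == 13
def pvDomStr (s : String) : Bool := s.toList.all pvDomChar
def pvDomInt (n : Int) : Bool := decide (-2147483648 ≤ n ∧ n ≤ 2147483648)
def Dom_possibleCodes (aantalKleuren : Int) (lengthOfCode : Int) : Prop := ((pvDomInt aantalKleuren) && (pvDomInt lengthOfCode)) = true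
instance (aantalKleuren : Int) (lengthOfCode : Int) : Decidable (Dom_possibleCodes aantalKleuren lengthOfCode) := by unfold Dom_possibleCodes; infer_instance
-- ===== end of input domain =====

-- B replaces the cartesian-product enumeration (itertools.product plus a join pass) by
-- base-k unranking: each index m < k^n is converted to base-k digits selecting alphabet
-- characters (objective: alternative); for negative lengthOfCode both raise (outside Pre_).


-- ===== PORT A =====
-- colors = ''; for color in range(aantalKleuren): colors += str(color + 1)
-- the accumulator is kept reversed (chars consed on) so the fold is linear like CPython's
-- str +=; the final reverse restores exactly the same string of characters.
def buildColorsA (aantalKleuren : Int) : List Char :=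
  ((PySem.List.pyRange 0 aantalKleuren 1).foldl
    (fun acc color => (PySem.Int.toChars (color + 1)).foldl (fun a c => c :: a) acc) []).reverse

-- one pass of itertools.product: result = [x + (y,) for x in result for y in pool];
-- each tuple is stored reversed (new char consed on, suffixes shared) so one step is O(1)
-- per produced tuple, as in CPython's product; the join below reverses it back.
def prodStepA (pool : List Char) (acc : List (List Char)) : List (List Char) :=
  acc.flatMap (fun t => pool.map (fun c => c :: t))

def possibleCodes (aantalKleuren : Int) (lengthOfCode : Int) : List String :=
  let colors := buildColorsA aantalKleuren
  -- list(product(colors, repeat=lengthOfCode)); lengthOfCode < 0 raises (excluded by Pre_)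
  let tuples := (PySem.List.pyRange 0 lengthOfCode 1).foldl
    (fun acc _ => prodStepA colors acc) [[]]
  -- join pass: listWithPossibleCodes[codeIndex] = "".join(tuple); reverse restores tuple order
  tuples.map (fun t => String.ofList t.reverse)

-- ===== PORT B =====
-- inner loop: for _ in range(n): m, d = divmod(m, k); digits.append(alphabet[d])
-- structural recursion on the loop counter carrying m; produces the digits in append
-- order (least significant first), exactly Python's `digits` list. alphabet[d] is ported
-- as getD: d = m % k < k = alphabet.length whenever the loop runs (m < k^n), so the
-- default is never used and this is exact.
def digitsB (alphabet : List Char) (k : Nat) : Nat → Nat → List Char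
  | 0, _ => []
  | n + 1, m => alphabet.getD (m % k) ' ' :: digitsB alphabet k n (m / k)

def possibleCodes_alt (aantalKleuren : Int) (lengthOfCode : Int) : List String :=
  -- alphabet = ''.join(str(i + 1) for i in range(aantalKleuren))
  let alphabet := (PySem.List.pyRange 0 aantalKleuren 1).flatMap
    (fun i => PySem.Int.toChars (i + 1))
  let k := alphabet.length
  -- for m in range(k ** lengthOfCode): …; negative lengthOfCode raises (excluded by Pre_)
  let n := lengthOfCode.toNat
  (List.range (k ^ n)).map (fun m =>
    -- codes.append(''.join(reversed(digits)))
    String.ofList (digitsB alphabet k n m).reverse)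

-- ===== PRECONDITION & SPEC =====
-- Pre_ excludes lengthOfCode < 0: there A's itertools.product raises ValueError (and B raises too).
def Pre_possibleCodes (aantalKleuren : Int) (lengthOfCode : Int) : Prop := 0 ≤ lengthOfCode
instance (aantalKleuren : Int) (lengthOfCode : Int) : Decidable (Pre_possibleCodes aantalKleuren lengthOfCode) := by unfold Pre_possibleCodes; infer_instance
def pvWitness_possibleCodes : Int × Int := (3, 2)

def Spec_possibleCodes (aantalKleuren : Int) (lengthOfCode : Int) (out : List String) : Prop := out = possibleCodes_alt aantalKleuren lengthOfCode
instance (aantalKleuren : Int) (lengthOfCode : Int) (out : List String) : Decidable (Spec_possibleCodes aantalKleuren lengthOfCode out) := by unfold Spec_possibleCodes; infer_instance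

-- ===== CLAIM (what is proved, stated in full; the proofs are below) =====
def Claim_equal_possibleCodes : Prop := ∀ (aantalKleuren : Int) (lengthOfCode : Int), Dom_possibleCodes aantalKleuren lengthOfCode → Pre_possibleCodes aantalKleuren lengthOfCode → Spec_possibleCodes aantalKleuren lengthOfCode (possibleCodes aantalKleuren lengthOfCode)

-- ===== LEMMAS AND PROOFS =====

theorem flatMap_singleton_map {a b : Type} (l : List a) (f : a -> b) :
    l.flatMap (fun x => [f x]) = l.map f := by
  induction l with
  | nil => rfl
  | cons x t ih => simp [ih]

theorem foldl_range_ignore {α β : Type} (f : α → α) (g : Nat → β) :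
    ∀ (k : Nat) (init : α), ((List.range k).map g).foldl (fun a _ => f a) init = f^[k] init := by
  intro k
  induction k with
  | zero => intro init; rfl
  | succ k ih =>
      intro init
      rw [List.range_succ]
      simp only [List.map_append, List.foldl_append, ih]
      simp [Function.iterate_succ_apply']

-- a foldl over a range that ignores the element is an iterate of the step
theorem foldl_pyRange_ignore_eq_iterate {α : Type} (f : α → α) (n : Int) (init : α) :
    (PySem.List.pyRange 0 n 1).foldl (fun a _ => f a) init = f^[n.toNat] init := by
  rw [PySem.List.pyRange_one]
  simpa using foldl_range_ignore f (fun k => (0 : Int) + k) (n - 0).toNat init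

-- prepend-style product over List Char: the common normal form of both programs
def prependWords (pool : List Char) : Nat → List (List Char)
  | 0 => [[]]
  | n + 1 => pool.flatMap (fun c => (prependWords pool n).map (fun t => c :: t))

-- choosing the last character last (A's extension step) equals choosing it inside
-- the prepend recursion: prependWords also satisfies A's right-extension equation.
theorem prependWords_succ_right (pool : List Char) :
    ∀ n, prependWords pool (n + 1)
      = (prependWords pool n).flatMap (fun t => pool.map (fun c => t ++ [c])) := by
  intro n
  induction n with
  | zero => simp [prependWords, flatMap_singleton_map]
  | succ n ih =>
      calc prependWords pool (n + 2)
          = pool.flatMap (fun c => (prependWords pool (n + 1)).map (fun t => c :: t)) := rfl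
        _ = pool.flatMap (fun c =>
              ((prependWords pool n).flatMap (fun t => pool.map (fun d => t ++ [d]))).map
                (fun t => c :: t)) := by rw [ih]
        _ = (pool.flatMap (fun c => (prependWords pool n).map (fun t => c :: t))).flatMap
              (fun t => pool.map (fun d => t ++ [d])) := by
            simp only [List.map_flatMap, List.flatMap_assoc, List.flatMap_map, List.map_map,
              Function.comp_def, List.cons_append]
        _ = (prependWords pool (n + 1)).flatMap (fun t => pool.map (fun d => t ++ [d])) := rfl

-- reversing A's reversed tuples turns an A-step into a right-extension step
theorem map_reverse_prodStepA (pool : List Char) (acc : List (List Char)) :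
    (prodStepA pool acc).map List.reverse
      = (acc.map List.reverse).flatMap (fun t => pool.map (fun c => t ++ [c])) := by
  simp only [prodStepA, List.map_flatMap, List.flatMap_map, List.map_map,
    Function.comp_def, List.reverse_cons]

-- A's iterated (reversed) tuples, re-reversed, are exactly the prepend words
theorem iterate_prodStepA_reverse (pool : List Char) :
    ∀ n, ((prodStepA pool)^[n] [[]]).map List.reverse = prependWords pool n := by
  intro n
  induction n with
  | zero => rfl
  | succ n ih =>
      rw [Function.iterate_succ_apply', map_reverse_prodStepA, ih, ← prependWords_succ_right]

-- colors: the reversed-accumulator fold builds the same characters as the flat join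
theorem foldl_cons_eq_reverse_append {α : Type} (l : List α) :
    ∀ acc, l.foldl (fun a c => c :: a) acc = l.reverse ++ acc := by
  induction l with
  | nil => intro acc; rfl
  | cons x t ih => intro acc; simp [List.foldl_cons, ih]

theorem buildColorsA_eq_flatMap (aantalKleuren : Int) :
    buildColorsA aantalKleuren
      = (PySem.List.pyRange 0 aantalKleuren 1).flatMap (fun i => PySem.Int.toChars (i + 1)) := by
  unfold buildColorsA
  suffices h : ∀ (L : List Int) (acc : List Char),
      L.foldl (fun acc color => (PySem.Int.toChars (color + 1)).foldl (fun a c => c :: a) acc) acc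
        = (L.flatMap (fun i => PySem.Int.toChars (i + 1))).reverse ++ acc by
    rw [h]; simp
  intro L
  induction L with
  | nil => intro acc; simp
  | cons x t ih =>
      intro acc
      rw [List.foldl_cons, ih, foldl_cons_eq_reverse_append]
      simp

-- splitting range (a*k) into a blocks of k
theorem range_mul_flatMap {β : Type} (k : Nat) (g : Nat → β) :
    ∀ a : Nat, (List.range (a * k)).map g
      = (List.range a).flatMap (fun q => (List.range k).map (fun r => g (q * k + r))) := by
  intro a
  induction a with
  | zero => simp
  | succ a ih =>
      rw [Nat.succ_mul, List.range_add, List.map_append, ih, List.range_succ,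
        List.flatMap_append]
      simp [List.map_map, Function.comp_def]

-- mapping f over a list = mapping f ∘ getD over the range of its indices
theorem map_eq_range_getD {α β : Type} (l : List α) (d : α) (f : α → β) :
    l.map f = (List.range l.length).map (fun i => f (l.getD i d)) := by
  apply List.ext_getElem
  · simp
  · intro i h1 h2
    simp only [List.getElem_map, List.getElem_range]
    rw [List.getD_eq_getElem l d (by simpa using h2)]

-- base-k unranking enumerates exactly the prepend words, in product order
theorem prependWords_eq_unrank (pool : List Char) :
    ∀ n : Nat, prependWords pool n
      = (List.range (pool.length ^ n)).map
          (fun m => (digitsB pool pool.length n m).reverse) := by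
  intro n
  induction n with
  | zero => rfl
  | succ n ih =>
      rcases Nat.eq_zero_or_pos pool.length with hk | hk
      · rw [List.length_eq_zero_iff] at hk
        subst hk
        simp [prependWords, pow_succ]
      · rw [prependWords_succ_right, ih, pow_succ, range_mul_flatMap,
          List.flatMap_map]
        apply List.flatMap_congr  -- pointwise on each block q
        intro q hq
        rw [map_eq_range_getD pool ' ' (fun c => (digitsB pool pool.length n q).reverse ++ [c])]
        apply List.map_congr_left
        intro r hr
        rw [List.mem_range] at hr
        have hd : (q * pool.length + r) / pool.length = q := by
          rw [Nat.add_comm, Nat.add_mul_div_right _ _ hk, Nat.div_eq_of_lt hr, Nat.zero_add]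
        have hm : (q * pool.length + r) % pool.length = r := by
          rw [Nat.add_comm, Nat.add_mul_mod_self_right, Nat.mod_eq_of_lt hr]
        simp only [digitsB, List.reverse_cons, hd, hm]

-- ===== VERDICT (by name: the statement is the Claim_ definition above) =====
theorem possibleCodes_spec : Claim_equal_possibleCodes := by
  intro aantalKleuren lengthOfCode _ _
  show possibleCodes aantalKleuren lengthOfCode = possibleCodes_alt aantalKleuren lengthOfCode
  simp only [possibleCodes, possibleCodes_alt, buildColorsA_eq_flatMap]
  rw [foldl_pyRange_ignore_eq_iterate (prodStepA _)]
  rw [show ∀ (l : List (List Char)), l.map (fun t => String.ofList t.reverse)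
        = (l.map List.reverse).map String.ofList from fun l => by simp [List.map_map]]
  rw [iterate_prodStepA_reverse, prependWords_eq_unrank]
  simp [List.map_map, Function.comp_def]
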